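-- pv_equiv track=rewrite | github.com/junho-one/algorithm | heap/ramyeon.py | solution
-- ===== SOURCE A (Python) =====
-- import heapq
--
-- def solution(stock, dates, supplies, k):
--
--     answer = 0
--     dateIdx = 0
--     heap = []
--
--     # stock은 k일까지만 버티면 되기에 k보다 커지면 충분한 양을 공급받은 상태이므로 종료
--     while stock < k :
--
--         # 현재 stock으로 버틸 수 있는 날짜까지 공급받을 수 있는 supply를 maxHeap으로 저장한다.
--         while dateIdx < len(dates):
--
--             # 날짜가 현재 stock을 넘어가면 현 상태로는 이 supply를 받을 수 없기에 종료
--             if dates[dateIdx] > stock: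
--                 break
--             # 가능한 날짜 안에 있는 supply는 담는다.
--             heapq.heappush(heap, -supplies[dateIdx])
--             dateIdx += 1
--
--         # 모든 공급 받을 수 있는 날짜까지 supply를 담고 최대값을 뽑아 stock에 더한다.
--         if heap:
--             stock += -heapq.heappop(heap)
--             answer += 1
--
--     return answer
-- ===== SOURCE B (Python) =====
-- def solution(stock, dates, supplies, k):
--     used = [False] * len(dates)
--     reach = 0
--     answer = 0
--     while stock < k:
--         while reach < len(dates) and dates[reach] <= stock:
--             reach += 1
--         best = -1
--         for j in range(reach):
--             if not used[j] and (best < 0 or supplies[j] > supplies[best]):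
--                 best = j
--         if best >= 0:
--             used[best] = True
--             stock += supplies[best]
--             answer += 1
--     return answer
-- ===== Notes on version B (the rewrite author's own statement) =====
-- stated objective: alternative
-- what changed: Drops A's heap of negated supplies entirely: B keeps a boolean 'used' array over the original input lists plus a sticky reach boundary and, each day, finds the best supply by a direct linear max-scan over the reachable unused indices.
-- outside the precondition, e.g. on solution(0, [0, 5], [10], 5): A returns 1, B returns 1
import Mathlib
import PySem

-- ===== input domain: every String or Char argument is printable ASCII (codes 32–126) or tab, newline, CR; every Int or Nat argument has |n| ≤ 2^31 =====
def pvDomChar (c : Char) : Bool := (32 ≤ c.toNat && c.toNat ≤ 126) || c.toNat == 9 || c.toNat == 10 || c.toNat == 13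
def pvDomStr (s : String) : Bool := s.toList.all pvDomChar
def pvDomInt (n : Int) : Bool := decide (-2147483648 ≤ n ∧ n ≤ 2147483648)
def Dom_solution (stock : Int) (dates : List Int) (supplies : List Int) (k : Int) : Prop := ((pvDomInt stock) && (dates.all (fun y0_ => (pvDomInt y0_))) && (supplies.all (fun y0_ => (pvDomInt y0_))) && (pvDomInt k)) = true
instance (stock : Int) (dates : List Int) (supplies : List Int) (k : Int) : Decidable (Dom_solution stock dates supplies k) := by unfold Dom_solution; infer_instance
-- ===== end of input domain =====

-- B drops A's heap: a 'used' boolean array over the input lists, a sticky reach boundary and a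
-- linear max-scan per day replace the heap of negated supplies (alternative structure, same count).

-- ===== PORT A =====
-- heapq.heappush into a min-heap, ported as ordered insertion into a sorted list
-- (min at the head, so heappop = take the head: the popped values are identical).
def hpushA (heap : List Int) (x : Int) : List Int := List.orderedInsert (· ≤ ·) x heap

-- inner 'while dateIdx < len(dates)' loop; fuel = remaining indices (dates.length - i suffices)
def fillA (dates supplies : List Int) (stock : Int) : Nat → Nat → List Int → Nat × List Int
  | 0, i, heap => (i, heap)    -- fuel out: only reached with i = len(dates), where the while ends
  | n + 1, i, heap =>
    match PySem.List.pyGet? dates (i : Int) with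
    | none => (i, heap)        -- dateIdx = len(dates): inner loop ends
    | some d =>
      if d > stock then (i, heap)
      else
        match PySem.List.pyGet? supplies (i : Int) with
        | none => (i, heap)    -- Python raises IndexError here (dates longer than supplies)
        | some s => fillA dates supplies stock n (i + 1) (hpushA heap (-s))

-- outer 'while stock < k' loop; Python may diverge (heap empty, stock < k), so fuel
-- (when Python terminates it does at most len(dates) pops, within this fuel)
def loopA (dates supplies : List Int) (k : Int) : Nat → Int → Nat → Int → List Int → Int
  | 0, _, _, answer, _ => answer     -- fuel exhausted: Python diverges here (both loops spin identically)
  | n + 1, stock, i, answer, heap =>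
    if stock < k then
      match fillA dates supplies stock (dates.length - i) i heap with
      | (i', heap') =>
        match heap' with
        | [] => loopA dates supplies k n stock i' answer []
        | m :: rest => loopA dates supplies k n (stock + (-m)) i' (answer + 1) rest
    else answer

def solution (stock : Int) (dates : List Int) (supplies : List Int) (k : Int) : Int :=
  loopA dates supplies k (dates.length + 1) stock 0 0 []

-- ===== PORT B =====
-- Source B inner 'while reach < len(dates) and dates[reach] <= stock': advance the boundary only
def reachB (dates : List Int) (stock : Int) : Nat → Nat → Nat
  | 0, i => i                  -- fuel out: only reached with i = len(dates), where the while ends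
  | n + 1, i =>
    match PySem.List.pyGet? dates (i : Int) with
    | none => i
    | some d => if d ≤ stock then reachB dates stock n (i + 1) else i

-- one step of Source B's 'for j in range(reach)' max-scan
-- (supplies[j] / supplies[best] are in range under Pre_, where getD is exact)
def pickB (supplies : List Int) (used : List Bool) (best : Int) (j : Nat) : Int :=
  if used.getD j false = false ∧ (best < 0 ∨ supplies.getD j 0 > supplies.getD best.toNat 0)
  then (j : Int) else best

-- Source B outer 'while stock < k' loop (same fuel discipline as A's port)
def loopB (dates supplies : List Int) (k : Int) : Nat → Int → Nat → List Bool → Int → Int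
  | 0, _, _, _, answer => answer     -- fuel exhausted: Python diverges here
  | n + 1, stock, reach, used, answer =>
    if stock < k then
      let r := reachB dates stock (dates.length - reach) reach
      let best := (List.range r).foldl (pickB supplies used) (-1)
      if 0 ≤ best then
        loopB dates supplies k n (stock + supplies.getD best.toNat 0) r (used.set best.toNat true) (answer + 1)
      else
        loopB dates supplies k n stock r used answer
    else answer

def solution_alt (stock : Int) (dates : List Int) (supplies : List Int) (k : Int) : Int :=
  loopB dates supplies k (dates.length + 1) stock 0 (List.replicate dates.length false) 0

-- ===== PRECONDITION & SPEC =====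
-- Pre_ excludes the inputs on which Python A can raise IndexError: when stock < k and dates is
-- longer than supplies, the loop may reach an index with a date but no supply (supplies[dateIdx]).
-- A few inputs of that shape on which A happens to return (the extra indices are never reached)
-- are excluded with it; see the cites in claim.json.
def Pre_solution (stock : Int) (dates : List Int) (supplies : List Int) (k : Int) : Prop :=
  k ≤ stock ∨ dates.length ≤ supplies.length
instance (stock : Int) (dates : List Int) (supplies : List Int) (k : Int) : Decidable (Pre_solution stock dates supplies k) := by unfold Pre_solution; infer_instance

def pvWitness_solution : Int × List Int × List Int × Int := (0, [0], [5], 3)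

def Spec_solution (stock : Int) (dates : List Int) (supplies : List Int) (k : Int) (out : Int) : Prop := out = solution_alt stock dates supplies k
instance (stock : Int) (dates : List Int) (supplies : List Int) (k : Int) (out : Int) : Decidable (Spec_solution stock dates supplies k out) := by unfold Spec_solution; infer_instance

-- ===== CLAIM (what is proved, stated in full; the proofs are below) =====
def Claim_equal_solution : Prop := ∀ (stock : Int) (dates : List Int) (supplies : List Int) (k : Int), Dom_solution stock dates supplies k → Pre_solution stock dates supplies k → Spec_solution stock dates supplies k (solution stock dates supplies k)

-- ===== LEMMAS AND PROOFS =====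

-- unused reachable indices, in increasing order
def pvS (used : List Bool) (r : Nat) : List Nat :=
  (List.range r).filter (fun j => used.getD j false = false)

def pvF (supplies : List Int) (j : Nat) : Int := -(supplies.getD j 0)

-- invariant tying A's state (dateIdx, heap) to B's state (reach, used)
def pvInv (dates supplies : List Int) (reach : Nat) (heap : List Int) (used : List Bool) : Prop :=
  used.length = dates.length ∧
  reach ≤ dates.length ∧
  (∀ j, reach ≤ j → used.getD j false = false) ∧
  heap.Pairwise (· ≤ ·) ∧
  heap.Perm ((pvS used reach).map (pvF supplies))

theorem pv_reach_mono (dates : List Int) (stock : Int) :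
    ∀ n i, i ≤ reachB dates stock n i ∧ reachB dates stock n i ≤ max i dates.length := by
  intro n
  induction n with
  | zero => intro i; simp [reachB]
  | succ n ih =>
    intro i
    simp only [reachB]
    cases hd : PySem.List.pyGet? dates (i : Int) with
    | none => simp
    | some d =>
      dsimp only
      by_cases hds : d ≤ stock
      · rw [if_pos hds]
        have hi : i < dates.length := by
          by_contra h
          have : PySem.List.pyGet? dates (i : Int) = none := by
            rw [PySem.List.pyGet?_natCast]
            exact List.getElem?_eq_none (by omega)
          simp [this] at hd
        have := ih (i + 1)
        constructor
        · omega
        · omega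
      · rw [if_neg hds]; simp

-- fillA's advanced index equals reachB, and its heap is the old one plus the new range, pushed
theorem pv_fill_eq (dates supplies : List Int) (stock : Int)
    (hlen : dates.length ≤ supplies.length) :
    ∀ n i heap, (fillA dates supplies stock n i heap).1 = reachB dates stock n i ∧
      (heap.Pairwise (· ≤ ·) → (fillA dates supplies stock n i heap).2.Pairwise (· ≤ ·)) ∧
      (fillA dates supplies stock n i heap).2.Perm
        (heap ++ (List.range' i (reachB dates stock n i - i)).map (pvF supplies)) := by
  intro n
  induction n with
  | zero => intro i heap; simp [fillA, reachB]
  | succ n ih =>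
    intro i heap
    simp only [fillA, reachB]
    cases hd : PySem.List.pyGet? dates (i : Int) with
    | none => simp
    | some d =>
      have hi : i < dates.length := by
        by_contra h
        have : PySem.List.pyGet? dates (i : Int) = none := by
          rw [PySem.List.pyGet?_natCast]
          exact List.getElem?_eq_none (by omega)
        simp [this] at hd
      dsimp only
      by_cases hds : d > stock
      · rw [if_pos hds, if_neg (by omega : ¬ d ≤ stock)]
        simp
      · rw [if_neg hds, if_pos (by omega : d ≤ stock)]
        have hs : PySem.List.pyGet? supplies (i : Int) = some (supplies.getD i 0) := by
          rw [PySem.List.pyGet?_natCast]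
          rw [List.getElem?_eq_getElem (by omega)]
          simp [List.getD, List.getElem?_eq_getElem (show i < supplies.length by omega)]
        rw [hs]
        obtain ⟨h1, h3, h4⟩ := ih (i + 1) (hpushA heap (-(supplies.getD i 0)))
        have hr1 : i + 1 ≤ reachB dates stock n (i + 1) := (pv_reach_mono dates stock n (i + 1)).1
        refine ⟨h1, ?_, ?_⟩
        · intro hsort
          exact h3 (List.Pairwise.orderedInsert _ _ hsort)
        · have hrange : List.range' i (reachB dates stock n (i + 1) - i) =
              i :: List.range' (i + 1) (reachB dates stock n (i + 1) - (i + 1)) := by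
            have : reachB dates stock n (i + 1) - i =
                (reachB dates stock n (i + 1) - (i + 1)) + 1 := by omega
            rw [this, List.range'_succ]
          rw [hrange, List.map_cons]
          have hpush : (hpushA heap (-(supplies.getD i 0))).Perm ((-(supplies.getD i 0)) :: heap) :=
            List.perm_orderedInsert _ _ _
          refine h4.trans ((hpush.append_right _).trans ?_)
          simpa [pvF] using (List.perm_middle (a := -(supplies.getD i 0)) (l₁ := heap)
            (l₂ := (List.range' (i + 1) (reachB dates stock n (i + 1) - (i + 1))).map (pvF supplies))).symm

-- the fold of pickB is -1 iff no unused reachable index, otherwise an argmax of supplies over pvS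
theorem pv_scan_spec (supplies : List Int) (used : List Bool) :
    ∀ r : Nat, ((List.range r).foldl (pickB supplies used) (-1) = -1 ∧ pvS used r = []) ∨
      (0 ≤ (List.range r).foldl (pickB supplies used) (-1) ∧
       ((List.range r).foldl (pickB supplies used) (-1)).toNat ∈ pvS used r ∧
       ∀ j ∈ pvS used r, supplies.getD j 0 ≤
         supplies.getD ((List.range r).foldl (pickB supplies used) (-1)).toNat 0) := by
  intro r
  induction r with
  | zero => left; simp [pvS]
  | succ r ih =>
    rw [List.range_succ]
    simp only [List.foldl_append, List.foldl_cons, List.foldl_nil]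
    have hS : pvS used (r + 1) = pvS used r ++
        (if used.getD r false = false then [r] else []) := by
      simp only [pvS, List.range_succ, List.filter_append]
      congr 1
      by_cases h : used.getD r false = false
      · have h' : used[r]?.getD false = false := by
          rw [← List.getD_eq_getElem?_getD]; exact h
        simp [List.filter, h']
      · have h' : used[r]?.getD false = true := by
          rw [← List.getD_eq_getElem?_getD]; exact Bool.ne_false_iff.mp h
        simp [List.filter, h']
    rcases ih with ⟨hb, hS0⟩ | ⟨hb0, hmem, hmax⟩
    · rw [hb]
      by_cases hu : used.getD r false = false
      · right
        simp only [pickB]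
        rw [if_pos ⟨hu, Or.inl (by norm_num)⟩]
        rw [hS, hS0, if_pos hu]
        refine ⟨by positivity, by simp, ?_⟩
        intro j hj
        simp at hj
        simp [hj]
      · left
        simp only [pickB]
        rw [if_neg (by intro hc; exact hu hc.1)]
        rw [hS, hS0, if_neg hu]
        simp
    · set b := (List.range r).foldl (pickB supplies used) (-1) with hbdef
      by_cases hu : used.getD r false = false
      · by_cases hgt : supplies.getD r 0 > supplies.getD b.toNat 0
        · right
          simp only [pickB]
          rw [if_pos ⟨hu, Or.inr hgt⟩]
          rw [hS, if_pos hu]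
          refine ⟨by positivity, by simp, ?_⟩
          intro j hj
          rcases List.mem_append.mp hj with hj | hj
          · have := hmax j hj
            simp only [Int.toNat_natCast]
            omega
          · simp at hj
            simp [hj]
        · right
          simp only [pickB]
          rw [if_neg (by rintro ⟨-, h | h⟩ <;> omega)]
          rw [hS, if_pos hu]
          exact ⟨hb0, List.mem_append_left _ hmem, by
            intro j hj
            rcases List.mem_append.mp hj with hj | hj
            · exact hmax j hj
            · simp at hj; subst hj; omega⟩
      · right
        simp only [pickB]
        rw [if_neg (by rintro ⟨h, -⟩; exact hu h)]
        rw [hS, if_neg hu]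
        simpa using ⟨hb0, hmem, hmax⟩

-- marking an unused index as used removes exactly it from the unused-index list
theorem pv_filter_set (used : List Bool) (jb : Nat) (hjb : jb < used.length) :
    ∀ r : Nat, jb < r → used.getD jb false = false →
    pvS (used.set jb true) r = (pvS used r).erase jb := by
  intro r hjr hu
  have hset_self : (used.set jb true).getD jb false = true := by
    rw [List.getD_eq_getElem?_getD, List.getElem?_set_self hjb]; rfl
  have hset_ne : ∀ j, j ≠ jb → (used.set jb true).getD j false = used.getD j false := by
    intro j hja
    rw [List.getD_eq_getElem?_getD, List.getElem?_set_ne (fun h => hja h.symm),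
      ← List.getD_eq_getElem?_getD]
  have key0 : ∀ l : List Nat, jb ∉ l →
      l.filter (fun j => (used.set jb true).getD j false = false) =
      l.filter (fun j => used.getD j false = false) := by
    intro l hl
    apply List.filter_congr
    intro j hj
    have hja : j ≠ jb := by rintro rfl; exact hl hj
    rw [hset_ne j hja]
  have key1 : ∀ l : List Nat, l.Nodup → jb ∈ l →
      l.filter (fun j => (used.set jb true).getD j false = false) =
      (l.filter (fun j => used.getD j false = false)).erase jb := by
    intro l
    induction l with
    | nil => simp
    | cons a t iht =>
      intro hnd hmem
      have hnd' : t.Nodup := hnd.of_cons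
      have hat : a ∉ t := (List.nodup_cons.mp hnd).1
      by_cases ha : a = jb
      · subst ha
        rw [List.filter_cons, List.filter_cons]
        rw [if_neg (by intro hcnd; rw [hset_self] at hcnd; simp at hcnd)]
        rw [if_pos (decide_eq_true hu), List.erase_cons_head]
        exact key0 t hat
      · have hjbt : jb ∈ t := by
          rcases List.mem_cons.mp hmem with h | h
          · exact absurd h.symm ha
          · exact h
        have hcond : (decide ((used.set jb true).getD a false = false)) =
            (decide (used.getD a false = false)) := by rw [hset_ne a ha]
        rw [List.filter_cons, List.filter_cons, hcond]
        by_cases hua : used.getD a false = false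
        · rw [if_pos (decide_eq_true hua), if_pos (decide_eq_true hua)]
          rw [List.erase_cons_tail (by simp [ha]), iht hnd' hjbt]
        · rw [if_neg (fun h => hua (of_decide_eq_true h)),
            if_neg (fun h => hua (of_decide_eq_true h))]
          exact iht hnd' hjbt
  unfold pvS
  exact key1 (List.range r) List.nodup_range (List.mem_range.mpr hjr)

theorem pv_sorted_head_min {m : Int} {rest : List Int} (h : (m :: rest).Pairwise (· ≤ ·)) :
    ∀ x ∈ m :: rest, m ≤ x := by
  intro x hx
  rcases List.mem_cons.mp hx with h1 | h1
  · omega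
  · exact List.rel_of_pairwise_cons h h1

theorem pv_loop_eq (dates supplies : List Int) (k : Int)
    (hlen : dates.length ≤ supplies.length) :
    ∀ (n : Nat) (stock : Int) (reach : Nat) (answer : Int) (heap : List Int) (used : List Bool),
      pvInv dates supplies reach heap used →
      loopA dates supplies k n stock reach answer heap =
      loopB dates supplies k n stock reach used answer := by
  intro n
  induction n with
  | zero => intro _ _ _ _ _ _; rfl
  | succ n ih =>
    intro stock reach answer heap used hinv
    obtain ⟨hul, hrl, hunused, hsort, hperm⟩ := hinv
    simp only [loopA, loopB]
    by_cases hk : stock < k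
    · rw [if_pos hk, if_pos hk]
      obtain ⟨hfst, hsorted, hfperm⟩ :=
        pv_fill_eq dates supplies stock hlen (dates.length - reach) reach heap
      set r := reachB dates stock (dates.length - reach) reach with hrdef
      have hrge : reach ≤ r := (pv_reach_mono dates stock _ reach).1
      have hrle : r ≤ dates.length := by
        have := (pv_reach_mono dates stock (dates.length - reach) reach).2
        omega
      set p := fillA dates supplies stock (dates.length - reach) reach heap with hp
      obtain ⟨i', heap'⟩ := p
      simp only at hfst hfperm hsorted
      subst hfst
      -- heap' ~ map pvF of unused indices < r
      have hSsplit : pvS used r = pvS used reach ++ List.range' reach (r - reach) := by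
        unfold pvS
        have : List.range r = List.range reach ++ List.range' reach (r - reach) := by
          rw [List.range_eq_range', List.range_eq_range']
          have hra := List.range'_append (s := 0) (step := 1) (m := reach) (n := r - reach)
          simp only [Nat.one_mul, Nat.zero_add] at hra
          rw [hra]
          congr 1
          omega
        rw [this, List.filter_append]
        congr 1
        apply List.filter_eq_self.mpr
        intro j hj
        have := List.mem_range'_1.mp hj
        simpa using hunused j (by omega)
      have hperm' : heap'.Perm ((pvS used r).map (pvF supplies)) := by
        rw [hSsplit, List.map_append]
        exact hfperm.trans (hperm.append_right _)
      have hsort' : heap'.Pairwise (· ≤ ·) := hsorted hsort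
      rcases pv_scan_spec supplies used r with ⟨hb, hS0⟩ | ⟨hb0, hbmem, hbmax⟩
      · -- nothing reachable and unused: A's heap' is empty too
        have hnil : heap' = [] := by
          have h2 : heap'.Perm [] := by
            rw [hS0] at hperm'
            simpa using hperm'
          exact h2.eq_nil
        subst hnil
        dsimp only
        rw [hb]
        rw [if_neg (by norm_num)]
        apply ih
        refine ⟨hul, hrle, fun j hj => hunused j (by omega), List.Pairwise.nil, ?_⟩
        rw [hS0]; simp
      · set b := (List.range r).foldl (pickB supplies used) (-1) with hbdef
        set jb := b.toNat with hjbdef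
        have hjbr : jb < r := by
          have := List.mem_filter.mp hbmem
          exact List.mem_range.mp this.1
        have hjbu : used.getD jb false = false := by
          have := List.mem_filter.mp hbmem
          simpa using this.2
        -- heap' is nonempty: jb's value is in it
        have hjbin : pvF supplies jb ∈ heap' :=
          hperm'.symm.subset (List.mem_map.mpr ⟨jb, hbmem, rfl⟩)
        cases heap' with
        | nil => simp at hjbin
        | cons m rest =>
          dsimp only
          rw [if_pos hb0]
          -- m = pvF jb : m is the min of the heap = -(max supply)
          have hmin : ∀ x ∈ m :: rest, m ≤ x := pv_sorted_head_min hsort'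
          have hle1 : m ≤ pvF supplies jb := hmin _ hjbin
          have hle2 : pvF supplies jb ≤ m := by
            have hm : m ∈ (pvS used r).map (pvF supplies) :=
              hperm'.subset List.mem_cons_self
            obtain ⟨j, hj, hje⟩ := List.mem_map.mp hm
            have := hbmax j hj
            simp only [pvF] at hje ⊢
            omega
          have hmeq : m = pvF supplies jb := le_antisymm hle1 hle2
          have hstock : stock + -m = stock + supplies.getD jb 0 := by
            simp [hmeq, pvF]
          rw [hstock]
          apply ih
          -- new invariant with used' = used.set jb true
          have hjbl : jb < used.length := by omega
          refine ⟨by simpa using hul, hrle, ?_, hsort'.of_cons, ?_⟩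
          · intro j hj
            rw [List.getD_eq_getElem?_getD, List.getElem?_set_ne (by omega : jb ≠ j),
              ← List.getD_eq_getElem?_getD]
            exact hunused j (by omega)
          · rw [pv_filter_set used jb hjbl r hjbr hjbu]
            have h1 : (pvS used r).Perm (jb :: (pvS used r).erase jb) :=
              List.perm_cons_erase hbmem
            have h2 : ((pvS used r).map (pvF supplies)).Perm
                (pvF supplies jb :: ((pvS used r).erase jb).map (pvF supplies)) := by
              simpa using h1.map (pvF supplies)
            have h3 : (m :: rest).Perm
                (m :: ((pvS used r).erase jb).map (pvF supplies)) := by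
              refine hperm'.trans ?_
              rw [hmeq]
              exact h2
            exact h3.cons_inv
    · rw [if_neg hk, if_neg hk]

-- ===== VERDICT (by name: the statement is the Claim_ definition above) =====
theorem solution_spec : Claim_equal_solution := by
  intro stock dates supplies k _ hpre
  unfold Spec_solution solution solution_alt
  rcases hpre with hpre | hpre
  · -- k ≤ stock: both loops return 0 at once
    simp [loopA, loopB, if_neg (by omega : ¬ stock < k)]
  · apply pv_loop_eq dates supplies k hpre
    refine ⟨by simp, by omega, ?_, List.Pairwise.nil, ?_⟩
    · intro j hj
      rw [List.getD_eq_getElem?_getD]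
      rcases Nat.lt_or_ge j dates.length with h | h
      · simp [h]
      · simp [List.getElem?_eq_none (by simpa using h :
          (List.replicate dates.length false).length ≤ j)]
    · have : pvS (List.replicate dates.length false) 0 = [] := by simp [pvS]
      rw [this]; simp
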